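-- pv_equiv track=rewrite | github.com/zdhoward/practice | ciphers/enigma.py | plugboard_switch
-- ===== SOURCE A (Python) =====
-- def plugboard_switch(_plugboard, _text):
--     """
--     The Enigma's Plugboard unit is manually patched to switch 2 letters before
--     and after the rotators' conversion
--     """
--     _text = list(_text)
--     for char1, char2 in _plugboard:
--         all_c1 = []
--         all_c2 = []
--         pos = 0
--         for char in _text:
--             if char == char1:
--                 all_c1.append(pos)
--             elif char == char2:
--                 all_c2.append(pos)
--             for char in all_c1:
--                 _text[char] = char2
--             for char in all_c2:
--                 _text[char] = char1
--             pos += 1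
--     return "".join(_text)
-- ===== SOURCE B (Python) =====
-- def plugboard_switch(_plugboard, _text):
--     """
--     The Enigma's Plugboard unit is manually patched to switch 2 letters before
--     and after the rotators' conversion
--     """
--     table = {}
--     for c in _text:
--         if c not in table:
--             v = c
--             for char1, char2 in _plugboard:
--                 if v == char1:
--                     v = char2
--                 elif v == char2:
--                     v = char1
--             table[c] = v
--     return "".join(table[c] for c in _text)
-- ===== Notes on version B (the rewrite author's own statement) =====
-- stated objective: faster
-- what changed: B replaces A's per-pair in-place rewriting of the whole text (with position lists rewritten after every character) by a memo table that threads each distinct character once through all plugboard pairs, then emits the result in a single pass.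
import Mathlib
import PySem

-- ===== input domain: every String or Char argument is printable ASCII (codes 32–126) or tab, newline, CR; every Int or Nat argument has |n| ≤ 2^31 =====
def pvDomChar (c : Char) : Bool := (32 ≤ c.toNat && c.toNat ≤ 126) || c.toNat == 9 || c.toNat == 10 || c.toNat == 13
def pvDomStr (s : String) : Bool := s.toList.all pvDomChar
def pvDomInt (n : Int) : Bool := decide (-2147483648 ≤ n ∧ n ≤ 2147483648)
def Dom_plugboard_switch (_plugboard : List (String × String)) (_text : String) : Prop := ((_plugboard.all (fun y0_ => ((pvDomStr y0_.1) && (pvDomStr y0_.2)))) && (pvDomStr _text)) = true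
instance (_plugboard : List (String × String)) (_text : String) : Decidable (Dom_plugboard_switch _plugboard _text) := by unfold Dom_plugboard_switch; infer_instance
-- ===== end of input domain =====

-- B builds a memo table that threads each distinct character once through all plugboard pairs,
-- instead of A's per-pair in-place rewriting of the whole text; same return value.

-- ===== PORT A =====
-- 'for char in all_c1: _text[char] = char2' — writes at recorded positions (always in range)
def pbWrite (t : List String) (ps : List Nat) (v : String) : List String :=
  ps.foldl (fun t p => t.set p v) t

-- one iteration of 'for char in _text' (pos = running index); reads the current list;
-- pos < length always holds, so getD with "" is exact
def pbPassBody (char1 char2 : String) (st : List String × List Nat × List Nat) (pos : Nat) :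
    List String × List Nat × List Nat :=
  let ch := st.1.getD pos ""
  let a1 := if ch = char1 then st.2.1 ++ [pos] else st.2.1
  let a2 := if ¬ ch = char1 ∧ ch = char2 then st.2.2 ++ [pos] else st.2.2
  (pbWrite (pbWrite st.1 a1 char2) a2 char1, a1, a2)

def plugboard_switch (_plugboard : List (String × String)) (_text : String) : String :=
  let t0 : List String := _text.toList.map (fun c => String.ofList [c])
  let t := _plugboard.foldl (fun t pr =>
      ((List.range t.length).foldl (pbPassBody pr.1 pr.2) (t, ([], []))).1) t0
  PySem.Str.join "" t

-- ===== PORT B =====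
-- thread one value through every pair in order
def pbThread (pairs : List (String × String)) (v0 : String) : String :=
  pairs.foldl (fun v pr => if v = pr.1 then pr.2 else if v = pr.2 then pr.1 else v) v0

def plugboard_switch_alt (_plugboard : List (String × String)) (_text : String) : String :=
  let table : PySem.Dict String String := _text.toList.foldl (fun d c =>
      if d.contains (String.ofList [c]) then d
      else d.insert (String.ofList [c]) (pbThread _plugboard (String.ofList [c]))) PySem.Dict.empty
  -- table[c]: the key is always present, so getD's default "" is never used
  PySem.Str.join "" (_text.toList.map (fun c => table.getD (String.ofList [c]) ""))

-- ===== PRECONDITION & SPEC =====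
def Spec_plugboard_switch (_plugboard : List (String × String)) (_text : String) (out : String) : Prop := out = plugboard_switch_alt _plugboard _text
instance (_plugboard : List (String × String)) (_text : String) (out : String) : Decidable (Spec_plugboard_switch _plugboard _text out) := by unfold Spec_plugboard_switch; infer_instance

-- ===== CLAIM (what is proved, stated in full; the proofs are below) =====
def Claim_equal_plugboard_switch : Prop := ∀ (_plugboard : List (String × String)) (_text : String), Dom_plugboard_switch _plugboard _text → Spec_plugboard_switch _plugboard _text (plugboard_switch _plugboard _text)

-- ===== LEMMAS AND PROOFS =====

-- the per-pair swap A applies pointwise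
def pbStep (c1 c2 s : String) : String := if s = c1 then c2 else if s = c2 then c1 else s

lemma set_self_of_getElem? (t : List String) (p : Nat) (v : String) (h : t[p]? = some v) :
    t.set p v = t := by
  apply List.ext_getElem?
  intro i
  by_cases hi : i = p
  · subst hi
    rw [List.getElem?_set_self (List.getElem?_eq_some_iff.mp h).1, h]
  · rw [List.getElem?_set_ne (by omega : p ≠ i)]

lemma pbWrite_noop (t : List String) (ps : List Nat) (v : String)
    (h : ∀ p ∈ ps, t[p]? = some v) : pbWrite t ps v = t := by
  induction ps generalizing t with
  | nil => rfl
  | cons q qs ih =>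
    have hq : t.set q v = t := set_self_of_getElem? t q v (h q (by simp))
    simp only [pbWrite, List.foldl_cons, hq]
    exact ih t (fun p hp => h p (by simp [hp]))

lemma pbWrite_concat (t : List String) (ps : List Nat) (q : Nat) (v : String) :
    pbWrite t (ps ++ [q]) v = (pbWrite t ps v).set q v := by
  simp [pbWrite, List.foldl_append]


lemma pass_inv (c1 c2 : String) (t0 : List String) (k : Nat) (hk : k ≤ t0.length) :
    (List.range k).foldl (pbPassBody c1 c2) (t0, ([], [])) =
      ((t0.take k).map (pbStep c1 c2) ++ t0.drop k,
       ((List.range k).filter (fun p => decide (t0.getD p "" = c1)),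
        (List.range k).filter (fun p => decide (¬ t0.getD p "" = c1 ∧ t0.getD p "" = c2)))) := by
  induction k with
  | zero => simp
  | succ k ih =>
    have hk' : k < t0.length := by omega
    rw [List.range_succ, List.foldl_append, ih (by omega)]
    set f := pbStep c1 c2 with hf
    obtain ⟨x, hx⟩ : ∃ x, t0[k]? = some x := ⟨t0[k], List.getElem?_eq_getElem hk'⟩
    have hxx : t0[k] = x := by simpa [List.getElem?_eq_getElem hk'] using hx
    have hgdk : t0.getD k "" = x := by simp [List.getD, hx]
    have hdrop : t0.drop k = x :: t0.drop (k+1) := by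
      rw [List.drop_eq_getElem_cons hk', hxx]
    set A := (t0.take k).map f with hA
    have hAlen : A.length = k := by
      rw [hA, List.length_map, List.length_take]; omega
    set R := t0.drop (k+1) with hR
    have htake : (t0.take (k+1)).map f = A ++ [f x] := by
      rw [List.take_succ, hx, hA]; simp
    rw [hdrop]
    set F1 := (List.range k).filter (fun p => decide (t0.getD p "" = c1)) with hF1
    set F2 := (List.range k).filter (fun p => decide (¬ t0.getD p "" = c1 ∧ t0.getD p "" = c2)) with hF2
    have hch : (A ++ x :: R).getD k "" = x := by
      rw [List.getD, ← hAlen, List.getElem?_append_right (le_refl _)]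
      simp
    have hvalA : ∀ p, p < k → A[p]? = some (f (t0.getD p "")) := by
      intro p hp
      rw [hA, List.getElem?_map, List.getElem?_take_of_lt hp,
        List.getElem?_eq_getElem (show p < t0.length by omega)]
      simp [List.getD, List.getElem?_eq_getElem (show p < t0.length by omega)]
    have h1 : ∀ (l : List String), ∀ p ∈ F1, (A ++ l)[p]? = some c2 := by
      intro l p hp
      rw [hF1] at hp
      simp only [List.mem_filter, List.mem_range, decide_eq_true_eq] at hp
      rw [List.getElem?_append_left (by omega), hvalA p hp.1, hp.2, hf]
      simp [pbStep]
    have h2 : ∀ (l : List String), ∀ p ∈ F2, (A ++ l)[p]? = some c1 := by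
      intro l p hp
      rw [hF2] at hp
      simp only [List.mem_filter, List.mem_range, decide_eq_true_eq] at hp
      have h21 := hp.2.1
      have h22 := hp.2.2
      simp only [List.getD] at h21 h22
      rw [List.getElem?_append_left (by omega), hvalA p hp.1, hf]
      simp [pbStep, List.getD, h21, h22]
    have hset : ∀ v : String, (A ++ x :: R).set k v = A ++ v :: R := by
      intro v
      rw [← hAlen]
      simp
    have hfilter : ∀ (pr : Nat → Bool), (List.range k ++ [k]).filter pr =
        (List.range k).filter pr ++ (if pr k then [k] else []) := by
      intro pr
      rw [List.filter_append]
      cases hpr : pr k <;> simp [hpr]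
    simp only [List.foldl_cons, List.foldl_nil, pbPassBody, hch]
    by_cases hc1 : x = c1
    · rw [if_pos hc1, if_neg (by simp [hc1]), pbWrite_concat, pbWrite_noop _ _ _ (h1 _),
        hset, pbWrite_noop _ _ _ (h2 _), htake]
      refine Prod.ext ?_ (Prod.ext ?_ ?_) <;> simp [hf, pbStep, hc1, hfilter, hgdk, hF1, hF2, hx]
    · by_cases hc2 : x = c2
      · have hne : ¬ c2 = c1 := fun h => hc1 (hc2.trans h)
        rw [if_neg hc1, if_pos ⟨hc1, hc2⟩, pbWrite_noop _ _ _ (h1 _), pbWrite_concat,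
          pbWrite_noop _ _ _ (h2 _), hset, htake]
        refine Prod.ext ?_ (Prod.ext ?_ ?_) <;>
          simp [hf, pbStep, hc1, hc2, hne, hfilter, hgdk, hF1, hF2, hx]
      · rw [if_neg hc1, if_neg (by simp [hc2]), pbWrite_noop _ _ _ (h1 _),
          pbWrite_noop _ _ _ (h2 _), htake]
        refine Prod.ext ?_ (Prod.ext ?_ ?_) <;>
          simp [hf, pbStep, hc1, hc2, hfilter, hgdk, hF1, hF2, hx]

lemma pass_eq_map (c1 c2 : String) (t : List String) :
    ((List.range t.length).foldl (pbPassBody c1 c2) (t, ([], []))).1 = t.map (pbStep c1 c2) := by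
  rw [pass_inv c1 c2 t t.length (le_refl _)]
  simp

lemma pbThread_cons (pr : String × String) (ps : List (String × String)) (v : String) :
    pbThread (pr :: ps) v = pbThread ps (pbStep pr.1 pr.2 v) := by
  simp [pbThread, pbStep]

lemma foldA_eq_map (pairs : List (String × String)) (t : List String) :
    pairs.foldl (fun t pr =>
      ((List.range t.length).foldl (pbPassBody pr.1 pr.2) (t, ([], []))).1) t
    = t.map (pbThread pairs) := by
  induction pairs generalizing t with
  | nil =>
    simp only [List.foldl_nil]
    rw [show List.map (pbThread []) t = List.map id t from List.map_congr_left (fun v _ => rfl),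
      List.map_id]
  | cons pr ps ih =>
    rw [List.foldl_cons, pass_eq_map, ih, List.map_map]
    apply List.map_congr_left
    intro v _
    exact (pbThread_cons pr ps v).symm

lemma table_contains (pairs : List (String × String)) (l : List Char)
    (d : PySem.Dict String String) (c : Char) (hc : c ∈ l) :
    (l.foldl (fun d c =>
        if d.contains (String.ofList [c]) then d
        else d.insert (String.ofList [c]) (pbThread pairs (String.ofList [c]))) d).contains
      (String.ofList [c]) = true := by
  induction l generalizing d with
  | nil => cases hc
  | cons a l ih =>
    rcases List.mem_cons.mp hc with rfl | hc
    · -- c = a : after the step the key is present; then monotone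
      have hmono : ∀ (l : List Char) (d : PySem.Dict String String) (k : String),
          d.contains k = true → (l.foldl (fun d c =>
            if d.contains (String.ofList [c]) then d
            else d.insert (String.ofList [c]) (pbThread pairs (String.ofList [c]))) d).contains k = true := by
        intro l
        induction l with
        | nil => intro d k h; exact h
        | cons b l ihm =>
          intro d k h
          simp only [List.foldl_cons]
          split
          · exact ihm d k h
          · exact ihm _ k (by rw [PySem.Dict.contains_insert, h]; simp)
      simp only [List.foldl_cons]
      split
      · next h => exact hmono l d _ h
      · exact hmono l _ _ (PySem.Dict.contains_insert_self _ _ _)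
    · simp only [List.foldl_cons]
      exact ih _ hc
  
lemma table_sound (pairs : List (String × String)) (l : List Char)
    (d : PySem.Dict String String)
    (hd : ∀ k, d.contains k = true → d.getD k "" = pbThread pairs k) :
    ∀ k, (l.foldl (fun d c =>
        if d.contains (String.ofList [c]) then d
        else d.insert (String.ofList [c]) (pbThread pairs (String.ofList [c]))) d).contains k = true →
      (l.foldl (fun d c =>
        if d.contains (String.ofList [c]) then d
        else d.insert (String.ofList [c]) (pbThread pairs (String.ofList [c]))) d).getD k "" = pbThread pairs k := by
  induction l generalizing d with
  | nil => exact hd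
  | cons a l ih =>
    simp only [List.foldl_cons]
    split
    · exact ih d hd
    · refine ih _ ?_
      intro k hk
      rw [PySem.Dict.getD_insert]
      split
      · next he => rw [he]
      · next he =>
        refine hd k ?_
        rw [PySem.Dict.contains_insert] at hk
        simpa [he] using hk

theorem plugboard_switch_alt_eq_thread (pb : List (String × String)) (txt : String) :
    plugboard_switch_alt pb txt
      = PySem.Str.join "" (txt.toList.map (fun c => pbThread pb (String.ofList [c]))) := by
  show PySem.Str.join "" (txt.toList.map (fun c =>
      (txt.toList.foldl (fun d c =>
        if d.contains (String.ofList [c]) then d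
        else d.insert (String.ofList [c]) (pbThread pb (String.ofList [c]))) PySem.Dict.empty).getD
          (String.ofList [c]) "")) = _
  congr 1
  apply List.map_congr_left
  intro c hc
  exact table_sound pb txt.toList PySem.Dict.empty
    (fun k h => by simp [PySem.Dict.contains_empty] at h) _
    (table_contains pb txt.toList PySem.Dict.empty c hc)

-- ===== VERDICT (by name: the statement is the Claim_ definition above) =====
theorem plugboard_switch_spec : Claim_equal_plugboard_switch := by
  intro pb txt _
  show PySem.Str.join "" (pb.foldl (fun t pr =>
      ((List.range t.length).foldl (pbPassBody pr.1 pr.2) (t, ([], []))).1)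
      (txt.toList.map (fun c => String.ofList [c])))
    = plugboard_switch_alt pb txt
  rw [foldA_eq_map, List.map_map, plugboard_switch_alt_eq_thread]
  rfl
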